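-- pv_equiv track=rewrite | github.com/SantiagoVera9812/Masyu | logicaMasyu/jugadorAutomatico.py | find_starting_pearl
-- ===== SOURCE A (Python) =====
-- def find_starting_pearl(matrix):
--     size = len(matrix)
--
--     # Check for a white pearl on the first/last row
--     for i in range(size):
--         if matrix[0][i] == 1:
--             return (0, i, 1)  # Type 1
--         if matrix[size-1][i] == 1:
--             return (size-1, i, 1)  # Type 1
--
--     # Check for a white pearl on the first/last column
--     for i in range(size):
--         if matrix[i][0] == 1:
--             return (i, 0, 2)  # Type 2
--         if matrix[i][size-1] == 1:
--             return (i, size-1, 2)  # Type 2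
--
--     # Check for a black pearl in the corners
--     if matrix[0][0] == 2:
--         return (0, 0, 3)  # Type 3
--     if matrix[0][size-1] == 2:
--         return (0, size-1, 3)  # Type 3
--     if matrix[size-1][0] == 2:
--         return (size-1, 0, 3)  # Type 3
--     if matrix[size-1][size-1] == 2:
--         return (size-1, size-1, 3)  # Type 3
--
--     # Check for any white pearl
--     for x in range(size):
--         for y in range(size):
--             if matrix[x][y] == 1:
--                 return (x, y, 4)  # Type 4
--
--     # Check for any black pearl
--     for x in range(size):
--         for y in range(size):
--             if matrix[x][y] == 2:
--                 return (x, y, 5)  # Type 5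
--
--     return None
-- ===== SOURCE B (Python) =====
-- def find_starting_pearl(matrix):
--     size = len(matrix)
--
--     # One row-major pass collecting first occurrences per category, then a
--     # priority-based combination (no staged rescans, no early returns in the scan).
--     t1_top = t1_bot = t2_left = t2_right = None   # column/row of first border white
--     white = black = None                          # first white / black cell anywhere
--     for x in range(size):
--         row = matrix[x]
--         for y in range(size):
--             v = row[y]
--             if v == 1:
--                 if white is None:
--                     white = (x, y)
--                 if x == 0 and t1_top is None:
--                     t1_top = y
--                 if x == size - 1 and t1_bot is None:
--                     t1_bot = y
--                 if y == 0 and t2_left is None: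
--                     t2_left = x
--                 if y == size - 1 and t2_right is None:
--                     t2_right = x
--             elif v == 2:
--                 if black is None:
--                     black = (x, y)
--
--     if t1_top is not None and (t1_bot is None or t1_top <= t1_bot):
--         return (0, t1_top, 1)
--     if t1_bot is not None:
--         return (size - 1, t1_bot, 1)
--     if t2_left is not None and (t2_right is None or t2_left <= t2_right):
--         return (t2_left, 0, 2)
--     if t2_right is not None:
--         return (t2_right, size - 1, 2)
--     if matrix[0][0] == 2:
--         return (0, 0, 3)
--     if matrix[0][size - 1] == 2:
--         return (0, size - 1, 3)
--     if matrix[size - 1][0] == 2: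
--         return (size - 1, 0, 3)
--     if matrix[size - 1][size - 1] == 2:
--         return (size - 1, size - 1, 3)
--     if white is not None:
--         return (white[0], white[1], 4)
--     if black is not None:
--         return (black[0], black[1], 5)
--     return None
-- ===== Notes on version B (the rewrite author's own statement) =====
-- stated objective: alternative
-- what changed: A's five staged scans with early returns are replaced by a single row-major pass that accumulates the first border-white column/row per side and the first white/black cell anywhere, followed by one priority-based combination of those accumulators.
-- outside the precondition, e.g. on find_starting_pearl([[1], [1]]): A returns (0, 0, 1), B raises IndexError
import Mathlib
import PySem

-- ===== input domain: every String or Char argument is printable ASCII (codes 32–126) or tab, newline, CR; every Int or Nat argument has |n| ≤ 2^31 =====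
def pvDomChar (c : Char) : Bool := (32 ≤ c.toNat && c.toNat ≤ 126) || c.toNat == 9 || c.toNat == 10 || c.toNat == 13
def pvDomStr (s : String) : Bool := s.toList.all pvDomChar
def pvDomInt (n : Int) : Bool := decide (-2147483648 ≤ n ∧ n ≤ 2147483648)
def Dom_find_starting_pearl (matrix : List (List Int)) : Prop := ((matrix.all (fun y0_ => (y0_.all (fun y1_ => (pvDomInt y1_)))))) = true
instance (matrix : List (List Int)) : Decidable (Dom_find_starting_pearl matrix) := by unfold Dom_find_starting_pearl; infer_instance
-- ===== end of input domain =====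

-- B replaces A's five staged scans with early returns by ONE row-major pass that
-- accumulates first occurrences per category, then combines them by priority
-- (objective: alternative algorithmic decomposition, same asymptotic cost).

-- matrix[r][c]; exact inside Pre_ (there every access performed is in range, so the
-- getD defaults are never consulted)
def pvAt (matrix : List (List Int)) (r c : Int) : Int :=
  (PySem.List.pyGet? ((PySem.List.pyGet? matrix r).getD []) c).getD 0

-- ===== PORT A =====
-- "if this scan block returned a result, return it; otherwise fall through"
def pvFirst {g : Type} (s t : Option g) : Option g :=
  match s with
  | some r => some r
  | none => t

def find_starting_pearl (matrix : List (List Int)) : Option (Int × Int × Int) :=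
  let size : Int := matrix.length
  pvFirst ((PySem.List.pyRange 0 size 1).findSome? (fun i =>
      if pvAt matrix 0 i = 1 then some ((0 : Int), i, (1 : Int))
      else if pvAt matrix (size - 1) i = 1 then some (size - 1, i, (1 : Int))
      else none)) <|
  pvFirst ((PySem.List.pyRange 0 size 1).findSome? (fun i =>
      if pvAt matrix i 0 = 1 then some (i, (0 : Int), (2 : Int))
      else if pvAt matrix i (size - 1) = 1 then some (i, size - 1, (2 : Int))
      else none)) <|
  if pvAt matrix 0 0 = 2 then some ((0 : Int), (0 : Int), (3 : Int))
  else if pvAt matrix 0 (size - 1) = 2 then some ((0 : Int), size - 1, (3 : Int))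
  else if pvAt matrix (size - 1) 0 = 2 then some (size - 1, (0 : Int), (3 : Int))
  else if pvAt matrix (size - 1) (size - 1) = 2 then some (size - 1, size - 1, (3 : Int))
  else
  pvFirst ((PySem.List.pyRange 0 size 1).findSome? (fun x =>
      (PySem.List.pyRange 0 size 1).findSome? (fun y =>
        if pvAt matrix x y = 1 then some (x, y, (4 : Int)) else none))) <|
  (PySem.List.pyRange 0 size 1).findSome? (fun x =>
    (PySem.List.pyRange 0 size 1).findSome? (fun y =>
      if pvAt matrix x y = 2 then some (x, y, (5 : Int)) else none))

-- ===== PORT B =====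
-- the six accumulators of B's single pass (all start as None)
structure PvAcc where
  t1t : Option Int            -- column of first white seen in row 0
  t1b : Option Int            -- column of first white seen in row size-1
  t2l : Option Int            -- row of first white seen in column 0
  t2r : Option Int            -- row of first white seen in column size-1
  w : Option (Int × Int)      -- first white cell anywhere (row-major)
  b : Option (Int × Int)      -- first black cell anywhere (row-major)
deriving Repr, DecidableEq

-- the body of B's inner loop
def pvStep (m : List (List Int)) (size : Int) (s : PvAcc) (x y : Int) : PvAcc :=
  let v := pvAt m x y
  if v = 1 then
    { s with
      w := s.w.or (some (x, y)),
      t1t := if x = 0 then s.t1t.or (some y) else s.t1t,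
      t1b := if x = size - 1 then s.t1b.or (some y) else s.t1b,
      t2l := if y = 0 then s.t2l.or (some x) else s.t2l,
      t2r := if y = size - 1 then s.t2r.or (some x) else s.t2r }
  else if v = 2 then { s with b := s.b.or (some (x, y)) }
  else s

def find_starting_pearl_alt (matrix : List (List Int)) : Option (Int × Int × Int) :=
  let size : Int := matrix.length
  let s : PvAcc :=
    (PySem.List.pyRange 0 size 1).foldl (fun s x =>
      (PySem.List.pyRange 0 size 1).foldl (fun s y => pvStep matrix size s x y) s)
    ⟨none, none, none, none, none, none⟩
  match s.t1t, s.t1b with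
  | some a, some b => if a ≤ b then some (0, a, 1) else some (size - 1, b, 1)
  | some a, none => some ((0 : Int), a, 1)
  | none, some b => some (size - 1, b, 1)
  | none, none =>
    match s.t2l, s.t2r with
    | some a, some b => if a ≤ b then some (a, 0, 2) else some (b, size - 1, 2)
    | some a, none => some (a, (0 : Int), 2)
    | none, some b => some (b, size - 1, 2)
    | none, none =>
      if pvAt matrix 0 0 = 2 then some ((0 : Int), (0 : Int), (3 : Int))
      else if pvAt matrix 0 (size - 1) = 2 then some ((0 : Int), size - 1, (3 : Int))
      else if pvAt matrix (size - 1) 0 = 2 then some (size - 1, (0 : Int), (3 : Int))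
      else if pvAt matrix (size - 1) (size - 1) = 2 then some (size - 1, size - 1, (3 : Int))
      else match s.w with
      | some wc => some (wc.1, wc.2, 4)
      | none => match s.b with
        | some bc => some (bc.1, bc.2, 5)
        | none => none

-- ===== PRECONDITION & SPEC =====
-- Pre_ excludes the empty matrix and ragged matrices with a row shorter than the
-- matrix itself: there both programs reach an out-of-range access and raise
-- IndexError (A may accidentally return first when an early cell matches, an
-- artefact of its scan order); inside Pre_ every access either program performs
-- is in range.
def Pre_find_starting_pearl (matrix : List (List Int)) : Prop :=
  matrix ≠ [] ∧ ∀ row ∈ matrix, matrix.length ≤ row.length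
instance (matrix : List (List Int)) : Decidable (Pre_find_starting_pearl matrix) := by
  unfold Pre_find_starting_pearl; infer_instance

def pvWitness_find_starting_pearl : List (List Int) := [[0, 2], [1, 0]]

def Spec_find_starting_pearl (matrix : List (List Int)) (out : Option (Int × Int × Int)) : Prop := out = find_starting_pearl_alt matrix
instance (matrix : List (List Int)) (out : Option (Int × Int × Int)) : Decidable (Spec_find_starting_pearl matrix out) := by unfold Spec_find_starting_pearl; infer_instance

-- ===== CLAIM (what is proved, stated in full; the proofs are below) =====
def Claim_equal_find_starting_pearl : Prop := ∀ (matrix : List (List Int)), Dom_find_starting_pearl matrix → Pre_find_starting_pearl matrix → Spec_find_starting_pearl matrix (find_starting_pearl matrix)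

-- ===== LEMMAS AND PROOFS =====


-- generic: fold over a flatMap = nested fold
theorem pv_foldl_flatMap {a b g : Type} (l : List a) (gf : a → List b) (f : g → b → g) (i : g) :
    (l.flatMap gf).foldl f i = l.foldl (fun s x => (gf x).foldl f s) i := by
  induction l generalizing i with
  | nil => rfl
  | cons c t ih => simp [List.foldl_append, ih]

-- generic: an Option field updated by .or accumulates the first match
theorem pv_foldl_or {a b g : Type} (l : List a) (f : g → a → g) (proj : g → Option b)
    (h : a → Option b) (hstep : ∀ s x, proj (f s x) = (proj s).or (h x)) (s0 : g) :
    proj (l.foldl f s0) = (proj s0).or (l.findSome? h) := by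
  induction l generalizing s0 with
  | nil => simp
  | cons c t ih =>
    rw [List.foldl_cons, ih, hstep, List.findSome?_cons]
    cases h c <;> simp

-- generic: findSome? over a flatMap
theorem pv_findSome?_flatMap {a b g : Type} (l : List a) (gf : a → List b) (h : b → Option g) :
    (l.flatMap gf).findSome? h = l.findSome? (fun x => (gf x).findSome? h) := by
  induction l with
  | nil => rfl
  | cons c t ih =>
    simp only [List.flatMap_cons, List.findSome?_append, List.findSome?_cons]
    cases (gf c).findSome? h <;> simp [ih]

-- generic: findSome? of a mapped-out result
theorem pv_findSome?_omap {a b g : Type} (l : List a) (h : a → Option b) (f : b → g) :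
    l.findSome? (fun x => (h x).map f) = (l.findSome? h).map f := by
  induction l with
  | nil => rfl
  | cons c t ih => rw [List.findSome?_cons, List.findSome?_cons]; cases h c <;> simp [ih]

-- generic: all elements give none
theorem pv_findSome?_none {a b : Type} (l : List a) (h : a → Option b)
    (hall : ∀ x ∈ l, h x = none) : l.findSome? h = none := by
  induction l with
  | nil => rfl
  | cons c t ih =>
    rw [List.findSome?_cons, hall c (List.mem_cons_self)]
    exact ih (fun x hx => hall x (List.mem_cons_of_mem _ hx))

-- generic: only one element can contribute
theorem pv_findSome?_unique {a b : Type} [DecidableEq a] (l : List a) (c : a) (h : a → Option b)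
    (hc : c ∈ l) (hother : ∀ x ∈ l, x ≠ c → h x = none) : l.findSome? h = h c := by
  induction l with
  | nil => cases hc
  | cons d t ih =>
    by_cases hd : d = c
    · subst hd
      rw [List.findSome?_cons]
      cases hh : h d with
      | some v => rfl
      | none =>
        rw [pv_findSome?_none t h (fun x hx => by
          by_cases hxd : x = d
          · rw [hxd]; exact hh
          · exact hother x (List.mem_cons_of_mem _ hx) hxd)]
    · have hct : c ∈ t := by
        rcases List.mem_cons.mp hc with h1 | h1
        · exact absurd h1.symm hd
        · exact h1
      rw [List.findSome?_cons, hother d List.mem_cons_self hd]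
      exact ih hct (fun x hx => hother x (List.mem_cons_of_mem _ hx))

-- a two-predicate interleaved scan over a strictly increasing list equals the
-- priority combination of the two separate first-match scans
theorem pv_pair_scan {g : Type} (l : List Int) (hl : l.Pairwise (· < ·))
    (p q : Int → Prop) [DecidablePred p] [DecidablePred q] (f gg : Int → g) :
    l.findSome? (fun i => if p i then some (f i) else if q i then some (gg i) else none)
    = (match l.findSome? (fun i => if p i then some i else none),
             l.findSome? (fun i => if q i then some i else none) with
       | some a, some b => if a ≤ b then some (f a) else some (gg b)
       | some a, none => some (f a)
       | none, some b => some (gg b)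
       | none, none => none) := by
  induction l with
  | nil => rfl
  | cons c t ih =>
    have hlt : ∀ x ∈ t, c < x := fun x hx => (List.pairwise_cons.mp hl).1 x hx
    have hl' := (List.pairwise_cons.mp hl).2
    simp only [List.findSome?_cons]
    by_cases hp : p c
    · simp only [if_pos hp]
      by_cases hq : q c
      · simp [if_pos hq]
      · simp only [if_neg hq]
        cases hb : t.findSome? (fun i => if q i then some i else none) with
        | none => rfl
        | some b =>
          have : c < b := by
            obtain ⟨z, hz, hzv⟩ := List.exists_of_findSome?_eq_some hb
            by_cases hqz : q z
            · rw [if_pos hqz] at hzv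
              injection hzv with h'
              subst h'
              exact hlt z hz
            · rw [if_neg hqz] at hzv; cases hzv
          simp [le_of_lt this]
    · simp only [if_neg hp]
      by_cases hq : q c
      · simp only [if_pos hq]
        cases ha : t.findSome? (fun i => if p i then some i else none) with
        | none => rfl
        | some a =>
          have : c < a := by
            obtain ⟨z, hz, hzv⟩ := List.exists_of_findSome?_eq_some ha
            by_cases hpz : p z
            · rw [if_pos hpz] at hzv
              injection hzv with h'
              subst h'
              exact hlt z hz
            · rw [if_neg hpz] at hzv; cases hzv
          simp [not_le_of_gt this]
      · simp only [if_neg hq]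
        exact ih hl'

-- the six projection equations of B's loop body
theorem pvStep_t1t (m : List (List Int)) (n : Int) (s : PvAcc) (x y : Int) :
    (pvStep m n s x y).t1t = s.t1t.or (if pvAt m x y = 1 ∧ x = 0 then some y else none) := by
  simp only [pvStep]
  by_cases h1 : pvAt m x y = 1
  · by_cases h2 : x = 0
    · subst h2; simp [h1]
    · simp [h1, h2]
  · by_cases h2 : pvAt m x y = 2 <;> simp [h1, h2]

theorem pvStep_t1b (m : List (List Int)) (n : Int) (s : PvAcc) (x y : Int) :
    (pvStep m n s x y).t1b = s.t1b.or (if pvAt m x y = 1 ∧ x = n - 1 then some y else none) := by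
  simp only [pvStep]
  by_cases h1 : pvAt m x y = 1
  · by_cases h2 : x = n - 1
    · subst h2; simp [h1]
    · simp [h1, h2]
  · by_cases h2 : pvAt m x y = 2 <;> simp [h1, h2]

theorem pvStep_t2l (m : List (List Int)) (n : Int) (s : PvAcc) (x y : Int) :
    (pvStep m n s x y).t2l = s.t2l.or (if pvAt m x y = 1 ∧ y = 0 then some x else none) := by
  simp only [pvStep]
  by_cases h1 : pvAt m x y = 1
  · by_cases h2 : y = 0
    · subst h2; simp [h1]
    · simp [h1, h2]
  · by_cases h2 : pvAt m x y = 2 <;> simp [h1, h2]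

theorem pvStep_t2r (m : List (List Int)) (n : Int) (s : PvAcc) (x y : Int) :
    (pvStep m n s x y).t2r = s.t2r.or (if pvAt m x y = 1 ∧ y = n - 1 then some x else none) := by
  simp only [pvStep]
  by_cases h1 : pvAt m x y = 1
  · by_cases h2 : y = n - 1
    · subst h2; simp [h1]
    · simp [h1, h2]
  · by_cases h2 : pvAt m x y = 2 <;> simp [h1, h2]

theorem pvStep_w (m : List (List Int)) (n : Int) (s : PvAcc) (x y : Int) :
    (pvStep m n s x y).w = s.w.or (if pvAt m x y = 1 then some (x, y) else none) := by
  by_cases h1 : pvAt m x y = 1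
  · simp [pvStep, h1]
  · by_cases h2 : pvAt m x y = 2 <;> simp [pvStep, h1, h2]

theorem pvStep_b (m : List (List Int)) (n : Int) (s : PvAcc) (x y : Int) :
    (pvStep m n s x y).b = s.b.or (if pvAt m x y = 2 then some (x, y) else none) := by
  by_cases h1 : pvAt m x y = 1
  · simp [pvStep, h1]
  · by_cases h2 : pvAt m x y = 2 <;> simp [pvStep, h1, h2]

set_option maxHeartbeats 1600000 in
theorem find_starting_pearl_spec : Claim_equal_find_starting_pearl := by
  intro matrix _ hpre
  have hn : 0 < (matrix.length : Int) := by
    have := hpre.1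
    cases matrix with
    | nil => exact absurd rfl this
    | cons r t => simp
  unfold Spec_find_starting_pearl find_starting_pearl find_starting_pearl_alt
  dsimp only []
  generalize hN : (matrix.length : Int) = n at *
  -- abbreviations
  have hfold :
      (PySem.List.pyRange 0 n 1).foldl (fun s x =>
          (PySem.List.pyRange 0 n 1).foldl (fun s y => pvStep matrix n s x y) s)
        (⟨none, none, none, none, none, none⟩ : PvAcc)
      = ((PySem.List.pyRange 0 n 1).flatMap (fun x =>
          (PySem.List.pyRange 0 n 1).map (fun y => (x, y)))).foldl
          (fun s c => pvStep matrix n s c.1 c.2) ⟨none, none, none, none, none, none⟩ := by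
    rw [pv_foldl_flatMap]
    simp only [List.foldl_map]
  rw [hfold]
  have hmem0 : (0 : Int) ∈ PySem.List.pyRange 0 n 1 := by
    rw [PySem.List.mem_pyRange_one]; omega
  have hmemN : (n - 1 : Int) ∈ PySem.List.pyRange 0 n 1 := by
    rw [PySem.List.mem_pyRange_one]; omega
  -- the six accumulator values
  have ht1t :
      (((PySem.List.pyRange 0 n 1).flatMap (fun x =>
          (PySem.List.pyRange 0 n 1).map (fun y => (x, y)))).foldl
          (fun s c => pvStep matrix n s c.1 c.2)
          (⟨none, none, none, none, none, none⟩ : PvAcc)).t1t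
      = (PySem.List.pyRange 0 n 1).findSome? (fun y =>
          if pvAt matrix 0 y = 1 then some y else none) := by
    rw [pv_foldl_or _ _ PvAcc.t1t
        (fun c => if pvAt matrix c.1 c.2 = 1 ∧ c.1 = 0 then some c.2 else none)
        (fun s c => pvStep_t1t matrix n s c.1 c.2)]
    rw [pv_findSome?_flatMap]
    simp only [List.findSome?_map, Option.none_or]
    rw [pv_findSome?_unique _ (0 : Int) _ hmem0 (fun x _ hx =>
      pv_findSome?_none _ _ (fun y _ => by simp [hx]))]
    simp [Function.comp_def]
  have ht1b :
      (((PySem.List.pyRange 0 n 1).flatMap (fun x =>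
          (PySem.List.pyRange 0 n 1).map (fun y => (x, y)))).foldl
          (fun s c => pvStep matrix n s c.1 c.2)
          (⟨none, none, none, none, none, none⟩ : PvAcc)).t1b
      = (PySem.List.pyRange 0 n 1).findSome? (fun y =>
          if pvAt matrix (n - 1) y = 1 then some y else none) := by
    rw [pv_foldl_or _ _ PvAcc.t1b
        (fun c => if pvAt matrix c.1 c.2 = 1 ∧ c.1 = n - 1 then some c.2 else none)
        (fun s c => pvStep_t1b matrix n s c.1 c.2)]
    rw [pv_findSome?_flatMap]
    simp only [List.findSome?_map, Option.none_or]
    rw [pv_findSome?_unique _ (n - 1 : Int) _ hmemN (fun x _ hx =>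
      pv_findSome?_none _ _ (fun y _ => by simp [hx]))]
    simp [Function.comp_def]
  have ht2l :
      (((PySem.List.pyRange 0 n 1).flatMap (fun x =>
          (PySem.List.pyRange 0 n 1).map (fun y => (x, y)))).foldl
          (fun s c => pvStep matrix n s c.1 c.2)
          (⟨none, none, none, none, none, none⟩ : PvAcc)).t2l
      = (PySem.List.pyRange 0 n 1).findSome? (fun x =>
          if pvAt matrix x 0 = 1 then some x else none) := by
    rw [pv_foldl_or _ _ PvAcc.t2l
        (fun c => if pvAt matrix c.1 c.2 = 1 ∧ c.2 = 0 then some c.1 else none)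
        (fun s c => pvStep_t2l matrix n s c.1 c.2)]
    rw [pv_findSome?_flatMap]
    simp only [List.findSome?_map, Option.none_or]
    have hinner : ∀ x : Int,
        (PySem.List.pyRange 0 n 1).findSome? (fun y =>
          if pvAt matrix x y = 1 ∧ y = 0 then some x else none)
        = (if pvAt matrix x 0 = 1 then some x else none) := by
      intro x
      rw [pv_findSome?_unique _ (0 : Int) _ hmem0 (fun y _ hy => by simp [hy])]
      simp
    simp only [Function.comp_def, hinner]
  have ht2r :
      (((PySem.List.pyRange 0 n 1).flatMap (fun x =>
          (PySem.List.pyRange 0 n 1).map (fun y => (x, y)))).foldl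
          (fun s c => pvStep matrix n s c.1 c.2)
          (⟨none, none, none, none, none, none⟩ : PvAcc)).t2r
      = (PySem.List.pyRange 0 n 1).findSome? (fun x =>
          if pvAt matrix x (n - 1) = 1 then some x else none) := by
    rw [pv_foldl_or _ _ PvAcc.t2r
        (fun c => if pvAt matrix c.1 c.2 = 1 ∧ c.2 = n - 1 then some c.1 else none)
        (fun s c => pvStep_t2r matrix n s c.1 c.2)]
    rw [pv_findSome?_flatMap]
    simp only [List.findSome?_map, Option.none_or]
    have hinner : ∀ x : Int,
        (PySem.List.pyRange 0 n 1).findSome? (fun y =>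
          if pvAt matrix x y = 1 ∧ y = n - 1 then some x else none)
        = (if pvAt matrix x (n - 1) = 1 then some x else none) := by
      intro x
      rw [pv_findSome?_unique _ (n - 1 : Int) _ hmemN (fun y _ hy => by simp [hy])]
      simp
    simp only [Function.comp_def, hinner]
  have hw :
      (((PySem.List.pyRange 0 n 1).flatMap (fun x =>
          (PySem.List.pyRange 0 n 1).map (fun y => (x, y)))).foldl
          (fun s c => pvStep matrix n s c.1 c.2)
          (⟨none, none, none, none, none, none⟩ : PvAcc)).w
      = (PySem.List.pyRange 0 n 1).findSome? (fun x =>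
          (PySem.List.pyRange 0 n 1).findSome? (fun y =>
            if pvAt matrix x y = 1 then some (x, y) else none)) := by
    rw [pv_foldl_or _ _ PvAcc.w
        (fun c => if pvAt matrix c.1 c.2 = 1 then some (c.1, c.2) else none)
        (fun s c => pvStep_w matrix n s c.1 c.2)]
    rw [pv_findSome?_flatMap]
    simp only [List.findSome?_map, Option.none_or]
    simp [Function.comp_def]
  have hb :
      (((PySem.List.pyRange 0 n 1).flatMap (fun x =>
          (PySem.List.pyRange 0 n 1).map (fun y => (x, y)))).foldl
          (fun s c => pvStep matrix n s c.1 c.2)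
          (⟨none, none, none, none, none, none⟩ : PvAcc)).b
      = (PySem.List.pyRange 0 n 1).findSome? (fun x =>
          (PySem.List.pyRange 0 n 1).findSome? (fun y =>
            if pvAt matrix x y = 2 then some (x, y) else none)) := by
    rw [pv_foldl_or _ _ PvAcc.b
        (fun c => if pvAt matrix c.1 c.2 = 2 then some (c.1, c.2) else none)
        (fun s c => pvStep_b matrix n s c.1 c.2)]
    rw [pv_findSome?_flatMap]
    simp only [List.findSome?_map, Option.none_or]
    simp [Function.comp_def]
  rw [ht1t, ht1b, ht2l, ht2r, hw, hb]
  -- A's interleaved border scans as priority combinations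
  rw [pv_pair_scan (PySem.List.pyRange 0 n 1) (PySem.List.pairwise_lt_pyRange_one 0 n)
      (fun i => pvAt matrix 0 i = 1) (fun i => pvAt matrix (n - 1) i = 1)
      (fun i => ((0 : Int), i, (1 : Int))) (fun i => (n - 1, i, (1 : Int)))]
  rw [pv_pair_scan (PySem.List.pyRange 0 n 1) (PySem.List.pairwise_lt_pyRange_one 0 n)
      (fun i => pvAt matrix i 0 = 1) (fun i => pvAt matrix i (n - 1) = 1)
      (fun i => (i, (0 : Int), (2 : Int))) (fun i => (i, n - 1, (2 : Int)))]
  -- A's full scans as mapped versions of B's accumulators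
  have hmap1 :
      (PySem.List.pyRange 0 n 1).findSome? (fun x =>
        (PySem.List.pyRange 0 n 1).findSome? (fun y =>
          if pvAt matrix x y = 1 then some (x, y, (4 : Int)) else none))
      = ((PySem.List.pyRange 0 n 1).findSome? (fun x =>
          (PySem.List.pyRange 0 n 1).findSome? (fun y =>
            if pvAt matrix x y = 1 then some (x, y) else none))).map
          (fun c => (c.1, c.2, (4 : Int))) := by
    rw [← pv_findSome?_omap]
    congr 1
    funext x
    rw [← pv_findSome?_omap]
    congr 1
    funext y
    by_cases h : pvAt matrix x y = 1 <;> simp [h]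
  have hmap2 :
      (PySem.List.pyRange 0 n 1).findSome? (fun x =>
        (PySem.List.pyRange 0 n 1).findSome? (fun y =>
          if pvAt matrix x y = 2 then some (x, y, (5 : Int)) else none))
      = ((PySem.List.pyRange 0 n 1).findSome? (fun x =>
          (PySem.List.pyRange 0 n 1).findSome? (fun y =>
            if pvAt matrix x y = 2 then some (x, y) else none))).map
          (fun c => (c.1, c.2, (5 : Int))) := by
    rw [← pv_findSome?_omap]
    congr 1
    funext x
    rw [← pv_findSome?_omap]
    congr 1
    funext y
    by_cases h : pvAt matrix x y = 2 <;> simp [h]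
  rw [hmap1, hmap2]
  -- now both sides are expressions in the same six option values: case analysis
  generalize (PySem.List.pyRange 0 n 1).findSome? (fun y =>
      if pvAt matrix 0 y = 1 then some y else none) = oT
  generalize (PySem.List.pyRange 0 n 1).findSome? (fun y =>
      if pvAt matrix (n - 1) y = 1 then some y else none) = oB
  generalize (PySem.List.pyRange 0 n 1).findSome? (fun x =>
      if pvAt matrix x 0 = 1 then some x else none) = oL
  generalize (PySem.List.pyRange 0 n 1).findSome? (fun x =>
      if pvAt matrix x (n - 1) = 1 then some x else none) = oR
  generalize (PySem.List.pyRange 0 n 1).findSome? (fun x =>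
      (PySem.List.pyRange 0 n 1).findSome? (fun y =>
        if pvAt matrix x y = 1 then some (x, y) else none)) = oW
  generalize (PySem.List.pyRange 0 n 1).findSome? (fun x =>
      (PySem.List.pyRange 0 n 1).findSome? (fun y =>
        if pvAt matrix x y = 2 then some (x, y) else none)) = oK
  cases oT <;> cases oB <;> cases oL <;> cases oR <;> cases oW <;> cases oK <;>
    simp [pvFirst] <;> split_ifs <;> simp
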